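-- pv_equiv track=rewrite | github.com/rog-works/tranp | rogw/tranp/lang/string.py | parse_braket_block
-- ===== SOURCE A (Python) =====
-- def parse_braket_block(text: str, brakets: str = '()') -> list[str]:
-- 	"""文字列内の括弧で囲われたブロックを展開する
--
-- 	Args:
-- 		text (str): 対象の文字列
-- 		brakets (str): 括弧のペア (default: '()')
-- 	Returns:
-- 		list[str]: 展開したブロックのリスト
-- 	"""
-- 	founds: list[tuple[int, int]] = []
-- 	stack: list[int] = []
-- 	index = 0
-- 	while index < len(text):
-- 		if text[index] in brakets:
-- 			if text[index] == brakets[0]: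
-- 				stack.append(index)
-- 			else:
-- 				start = stack.pop()
-- 				founds.append((start, index + 1))
--
-- 		index = index + 1
--
-- 	founds = sorted(founds, key=lambda entry: entry[0])
-- 	return [text[found[0]:found[1]] for found in founds]
-- ===== SOURCE B (Python) =====
-- def parse_braket_block(text: str, brakets: str = '()') -> list[str]:
-- 	"""文字列内の括弧で囲われたブロックを展開する (no sort: a stack of frames
-- 	collects each bracket's children; a closed block is emitted before its
-- 	children, so the result is already in opening order)"""
-- 	result: list[str] = []
-- 	stack: list[tuple[int, list[str]]] = []
-- 	for index, ch in enumerate(text):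
-- 		if ch in brakets:
-- 			if ch == brakets[0]:
-- 				stack.append((index, []))
-- 			else:
-- 				start, children = stack.pop()
-- 				block = [text[start:index + 1]] + children
-- 				if stack:
-- 					stack[-1][1].extend(block)
-- 				else:
-- 					result.extend(block)
-- 	for _, children in stack:
-- 		result.extend(children)
-- 	return result
-- ===== Notes on version B (the rewrite author's own statement) =====
-- stated objective: alternative
-- what changed: Instead of collecting (start,end) pairs in closing order and sorting them by start afterwards, B keeps a stack of frames each accumulating its already-closed child blocks; when a bracket closes, its block followed by its children is merged into the enclosing frame (or the result), so blocks are emitted in opening order with no sort and no index pairs.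
import Mathlib
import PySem

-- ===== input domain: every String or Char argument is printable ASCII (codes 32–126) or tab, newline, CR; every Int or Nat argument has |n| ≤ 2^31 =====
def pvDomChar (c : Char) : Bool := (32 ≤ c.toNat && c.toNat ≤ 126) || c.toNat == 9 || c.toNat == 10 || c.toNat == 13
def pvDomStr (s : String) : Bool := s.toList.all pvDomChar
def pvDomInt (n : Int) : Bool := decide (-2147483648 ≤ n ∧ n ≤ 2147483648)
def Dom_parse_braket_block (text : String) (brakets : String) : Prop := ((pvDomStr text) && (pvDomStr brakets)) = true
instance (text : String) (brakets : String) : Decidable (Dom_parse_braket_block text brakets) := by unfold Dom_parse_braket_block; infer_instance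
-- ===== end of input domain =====

-- B replaces A's collect-then-sort with a single pass over a stack of frames, each
-- accumulating its already-closed child blocks; a closing bracket emits its block before
-- its children into the enclosing frame, so the output is already in opening order and no
-- sort and no (start,end) pairs are needed (an alternative algorithm; not measured faster).

-- ===== PORT A =====
-- the while loop of A: scan the characters, push opening positions, on a closing bracket
-- pop and append (start, index+1) to founds; the [] branch of the pop is Python's
-- IndexError (excluded by Pre_), the value returned there is irrelevant
def pvGoA (bl : List Char) : List Char → Int → List (Int × Int) → List Int → List (Int × Int)
  | [], _, founds, _ => founds
  | c :: rest, i, founds, stack =>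
    if bl.contains c then
      if bl.head? == some c then
        pvGoA bl rest (i + 1) founds (i :: stack)
      else
        match stack with
        | s :: stack' => pvGoA bl rest (i + 1) (founds ++ [(s, i + 1)]) stack'
        | [] => founds
    else pvGoA bl rest (i + 1) founds stack

def parse_braket_block (text : String) (brakets : String) : List String :=
  (PySem.List.sorted (pvGoA brakets.toList text.toList 0 [] []) (fun entry => entry.1) false).map
    (fun found => PySem.Str.slice text (some found.1) (some found.2))

-- ===== PORT B =====
-- the for loop of B: an opening bracket pushes a fresh frame (index, []); a closing
-- bracket pops its frame, builds block = slice :: children and extends the enclosing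
-- frame's children (or the result when the stack is empty) with it; the [] branch of
-- the pop is Python's IndexError (excluded by Pre_)
def pvGoB (text : String) (bl : List Char) : List Char → Int → List String → List (Int × List String) → List String × List (Int × List String)
  | [], _, result, stack => (result, stack)
  | c :: rest, i, result, stack =>
    if bl.contains c then
      if bl.head? == some c then
        pvGoB text bl rest (i + 1) result ((i, []) :: stack)
      else
        match stack with
        | (s, children) :: stack' =>
          match stack' with
          | (s', ch') :: stack'' =>
              pvGoB text bl rest (i + 1) result
                ((s', ch' ++ (PySem.Str.slice text (some s) (some (i + 1)) :: children)) :: stack'')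
          | [] =>
              pvGoB text bl rest (i + 1)
                (result ++ (PySem.Str.slice text (some s) (some (i + 1)) :: children)) []
        | [] => (result, stack)
    else pvGoB text bl rest (i + 1) result stack

-- the trailing `for _, children in stack: result.extend(children)` walks the stack bottom
-- to top, i.e. the reversed Lean stack (whose head is the top)
def parse_braket_block_alt (text : String) (brakets : String) : List String :=
  let st := pvGoB text brakets.toList text.toList 0 [] []
  (st.2.reverse).foldl (fun r f => r ++ f.2) st.1

-- ===== PRECONDITION & SPEC =====
def pvIsOpen (bl : List Char) (c : Char) : Bool := bl.contains c && (bl.head? == some c)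
def pvIsClose (bl : List Char) (c : Char) : Bool := bl.contains c && !(bl.head? == some c)

-- Pre_ excludes exactly the inputs with an unmatched closing bracket (some prefix holds more
-- closers than openers): there both Pythons raise IndexError on `stack.pop()`.
def Pre_parse_braket_block (text : String) (brakets : String) : Prop :=
  ∀ n ≤ text.toList.length,
    (text.toList.take n).countP (pvIsClose brakets.toList)
      ≤ (text.toList.take n).countP (pvIsOpen brakets.toList)
instance (text : String) (brakets : String) : Decidable (Pre_parse_braket_block text brakets) := by
  unfold Pre_parse_braket_block; infer_instance

def pvWitness_parse_braket_block : String × String := ("(a(b)c)(d)", "()")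

def Spec_parse_braket_block (text : String) (brakets : String) (out : List String) : Prop := out = parse_braket_block_alt text brakets
instance (text : String) (brakets : String) (out : List String) : Decidable (Spec_parse_braket_block text brakets out) := by unfold Spec_parse_braket_block; infer_instance

-- ===== CLAIM (what is proved, stated in full; the proofs are below) =====
def Claim_equal_parse_braket_block : Prop := ∀ (text : String) (brakets : String), Dom_parse_braket_block text brakets → Pre_parse_braket_block text brakets → Spec_parse_braket_block text brakets (parse_braket_block text brakets)

-- ===== LEMMAS AND PROOFS =====

-- block extraction for a matched pair (the final map shape of A)
def pvSlice (text : String) (p : Int × Int) : String := PySem.Str.slice text (some p.1) (some p.2)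

-- A's answer for a founds list: sort by start, slice
def pvBlocks (text : String) (F : List (Int × Int)) : List String :=
  (PySem.List.sorted F (fun entry => entry.1) false).map (pvSlice text)

-- the canonical B state determined by A's state: each open position s on the stack owns
-- the closed pairs whose start lies strictly between s and the next-higher open position
def pvFramesOf (text : String) : List (Int × Int) → List Int → List (Int × List String)
  | _, [] => []
  | F, s :: rest =>
    (s, pvBlocks text (F.filter (fun p => decide (s < p.1)))) ::
      pvFramesOf text (F.filter (fun p => decide (p.1 < s))) rest

-- the closed pairs below every open position on the stack: B's result so far
def pvLowOf : List (Int × Int) → List Int → List (Int × Int)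
  | F, [] => F
  | F, s :: rest => pvLowOf (F.filter (fun p => decide (p.1 < s))) rest

-- B's trailing extend loop flattens the reversed stack
lemma pvFoldl_extend (L : List (Int × List String)) (r : List String) :
    L.foldl (fun acc f => acc ++ f.2) r = r ++ L.flatMap (fun f => f.2) := by
  induction L generalizing r with
  | nil => simp
  | cons a t ih => simp [List.foldl_cons, ih, List.append_assoc]

-- pairwise ≤ on nodup keys is pairwise <
lemma pvPairwise_lt (l : List (Int × Int))
    (hnd : (l.map Prod.fst).Nodup) (hle : l.Pairwise (fun a b => a.1 ≤ b.1)) :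
    l.Pairwise (fun a b => a.1 < b.1) := by
  induction l with
  | nil => exact List.Pairwise.nil
  | cons a t ih =>
    simp only [List.map_cons, List.nodup_cons] at hnd
    rcases List.pairwise_cons.mp hle with ⟨hle1, hle2⟩
    refine List.pairwise_cons.mpr ⟨fun b hb => ?_, ih hnd.2 hle2⟩
    have hne : a.1 ≠ b.1 := fun h => hnd.1 (h ▸ List.mem_map_of_mem hb)
    exact lt_of_le_of_ne (hle1 b hb) hne

lemma pvNodup_filter (F : List (Int × Int)) (q : Int × Int → Bool)
    (hnd : (F.map Prod.fst).Nodup) : ((F.filter q).map Prod.fst).Nodup :=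
  (List.Sublist.map Prod.fst List.filter_sublist).nodup hnd

-- the sorted order of F ++ M, all keys of M equal to s and absent from F, splits at s
lemma pvSorted_concat (F M : List (Int × Int)) (s : Int)
    (hnd : (F.map Prod.fst).Nodup) (hne : ∀ p ∈ F, p.1 ≠ s)
    (hM : ∀ p ∈ M, p.1 = s) (hM1 : M.length ≤ 1) :
    PySem.List.sorted (F ++ M) (fun entry => entry.1) false
      = PySem.List.sorted (F.filter (fun p => decide (p.1 < s))) (fun entry => entry.1) false
        ++ M
        ++ PySem.List.sorted (F.filter (fun p => decide (s < p.1))) (fun entry => entry.1) false := by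
  set low := F.filter (fun p => decide (p.1 < s)) with hlow
  set high := F.filter (fun p => decide (s < p.1)) with hhigh
  set sl := PySem.List.sorted low (fun entry => entry.1) false with hsl
  set sh := PySem.List.sorted high (fun entry => entry.1) false with hsh
  have hpl : sl.Perm low := PySem.List.sorted_perm ..
  have hph : sh.Perm high := PySem.List.sorted_perm ..
  have hmeml : ∀ p ∈ sl, p.1 < s := by
    intro p hp
    have := List.mem_filter.mp (hpl.mem_iff.mp hp)
    simpa using this.2
  have hmemh : ∀ p ∈ sh, s < p.1 := by
    intro p hp
    have := List.mem_filter.mp (hph.mem_iff.mp hp)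
    simpa using this.2
  -- the partition permutation
  have hFsplit : (low ++ high).Perm F := by
    have h := F.filter_append_perm (fun p => decide (p.1 < s))
    have heq : F.filter (fun p => !decide (p.1 < s)) = high := by
      rw [hhigh]
      apply List.filter_congr
      intro p hp
      have := hne p hp
      by_cases h1 : p.1 < s
      · simp [h1]; omega
      · simp [h1]; omega
    rwa [heq] at h
  have hperm : (sl ++ (M ++ sh)).Perm (F ++ M) := by
    have t1 : (sl ++ (M ++ sh)).Perm (low ++ (M ++ high)) :=
      hpl.append (List.Perm.append_left M hph)
    have t2 : (low ++ (M ++ high)).Perm (low ++ (high ++ M)) :=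
      List.Perm.append_left low List.perm_append_comm
    have t4 : ((low ++ high) ++ M).Perm (F ++ M) := hFsplit.append_right M
    rw [List.append_assoc] at t4
    exact (t1.trans t2).trans t4
  -- strict sortedness of the assembled list
  have hpwl : sl.Pairwise (fun a b => a.1 < b.1) :=
    pvPairwise_lt sl ((hpl.map Prod.fst).nodup_iff.mpr (pvNodup_filter F _ hnd))
      (PySem.List.sorted_pairwise ..)
  have hpwh : sh.Pairwise (fun a b => a.1 < b.1) :=
    pvPairwise_lt sh ((hph.map Prod.fst).nodup_iff.mpr (pvNodup_filter F _ hnd))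
      (PySem.List.sorted_pairwise ..)
  have hpwM : M.Pairwise (fun a b => a.1 < b.1) := by
    cases M with
    | nil => exact List.Pairwise.nil
    | cons a t =>
      cases t with
      | nil => exact List.pairwise_singleton _ _
      | cons b u => simp at hM1
  have hpw : (sl ++ (M ++ sh)).Pairwise (fun a b => a.1 < b.1) := by
    rw [List.pairwise_append]
    refine ⟨hpwl, ?_, ?_⟩
    · rw [List.pairwise_append]
      refine ⟨hpwM, hpwh, fun a ha b hb => ?_⟩
      rw [hM a ha]
      exact hmemh b hb
    · intro a ha b hb
      have h1 := hmeml a ha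
      rcases List.mem_append.mp hb with h | h
      · rw [hM b h]; exact h1
      · exact lt_trans h1 (hmemh b h)
  have : PySem.List.sorted (F ++ M) (fun entry => entry.1) false = sl ++ (M ++ sh) :=
    PySem.List.sorted_eq_of_perm_of_pairwise_lt _ _ _ hperm hpw
  rw [this, List.append_assoc]

-- blocks version of the split (M = [])
lemma pvBlocks_split (text : String) (F : List (Int × Int)) (s : Int)
    (hnd : (F.map Prod.fst).Nodup) (hne : ∀ p ∈ F, p.1 ≠ s) :
    pvBlocks text F
      = pvBlocks text (F.filter (fun p => decide (p.1 < s)))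
        ++ pvBlocks text (F.filter (fun p => decide (s < p.1))) := by
  have h := pvSorted_concat F [] s hnd hne (by simp) (by simp)
  simp only [List.append_nil] at h
  unfold pvBlocks
  rw [h, List.map_append]

-- blocks version of inserting the freshly closed pair (s, e)
lemma pvBlocks_insert (text : String) (F : List (Int × Int)) (s e : Int)
    (hnd : (F.map Prod.fst).Nodup) (hne : ∀ p ∈ F, p.1 ≠ s) :
    pvBlocks text (F ++ [(s, e)])
      = pvBlocks text (F.filter (fun p => decide (p.1 < s)))
        ++ pvSlice text (s, e) :: pvBlocks text (F.filter (fun p => decide (s < p.1))) := by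
  have h := pvSorted_concat F [(s, e)] s hnd hne (by simp) (by simp)
  unfold pvBlocks
  rw [h]
  simp [List.map_append]

-- filter facts used by the steps
lemma pvFilter_lt_all (F : List (Int × Int)) (i : Int) (h : ∀ p ∈ F, p.1 < i) :
    F.filter (fun p => decide (p.1 < i)) = F :=
  List.filter_eq_self.mpr (fun p hp => by simpa using h p hp)

lemma pvFilter_gt_all (F : List (Int × Int)) (i : Int) (h : ∀ p ∈ F, p.1 < i) :
    F.filter (fun p => decide (i < p.1)) = [] :=
  List.filter_eq_nil_iff.mpr (fun p hp => by have := h p hp; simp; omega)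

lemma pvFilter_absorb_gt (F : List (Int × Int)) (s' s : Int) (h : s' < s) :
    (F.filter (fun p => decide (s' < p.1))).filter (fun p => decide (s < p.1))
      = F.filter (fun p => decide (s < p.1)) := by
  rw [List.filter_filter]
  apply List.filter_congr
  intro p _
  by_cases hp : s < p.1 <;> simp [hp] <;> omega

lemma pvFilter_absorb_lt (F : List (Int × Int)) (s' s : Int) (h : s' < s) :
    (F.filter (fun p => decide (p.1 < s))).filter (fun p => decide (p.1 < s'))
      = F.filter (fun p => decide (p.1 < s')) := by
  rw [List.filter_filter]
  apply List.filter_congr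
  intro p _
  by_cases hp : p.1 < s' <;> simp [hp] <;> omega

lemma pvFilter_comm (F : List (Int × Int)) (s' s : Int) :
    (F.filter (fun p => decide (s' < p.1))).filter (fun p => decide (p.1 < s))
      = (F.filter (fun p => decide (p.1 < s))).filter (fun p => decide (s' < p.1)) := by
  rw [List.filter_filter, List.filter_filter]
  apply List.filter_congr
  intro p _
  by_cases h1 : s' < p.1 <;> by_cases h2 : p.1 < s <;> simp [h1, h2]


-- the invariant tying A's state to the canonical B state
structure PvWf (bl : List Char) (done : List Char) (F : List (Int × Int)) (stA : List Int) : Prop where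
  hdec : stA.Pairwise (· > ·)
  hstlt : ∀ s ∈ stA, s < (done.length : Int)
  hflt : ∀ p ∈ F, p.1 < (done.length : Int)
  hnomem : ∀ p ∈ F, p.1 ∉ stA
  hnd : (F.map Prod.fst).Nodup
  hcnt : stA.length + done.countP (pvIsClose bl) = done.countP (pvIsOpen bl)

-- at the end of the text, B's bubble-up of the unclosed frames reproduces A's sorted blocks
lemma pvBubble (text : String) (F : List (Int × Int)) (stA : List Int)
    (hnomem : ∀ p ∈ F, p.1 ∉ stA) (hnd : (F.map Prod.fst).Nodup) :
    pvBlocks text (pvLowOf F stA) ++ (pvFramesOf text F stA).reverse.flatMap (fun f => f.2)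
      = pvBlocks text F := by
  induction stA generalizing F with
  | nil => simp [pvLowOf, pvFramesOf]
  | cons s rest ih =>
    have hne : ∀ p ∈ F, p.1 ≠ s := fun p hp h =>
      hnomem p hp (h ▸ List.mem_cons_self)
    have hnm' : ∀ p ∈ F.filter (fun p => decide (p.1 < s)), p.1 ∉ rest := fun p hp h =>
      hnomem p (List.mem_of_mem_filter hp) (List.mem_cons_of_mem _ h)
    have := ih (F.filter (fun p => decide (p.1 < s))) hnm' (pvNodup_filter F _ hnd)
    simp only [pvLowOf, pvFramesOf, List.reverse_cons, List.flatMap_append, List.flatMap_cons,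
      List.flatMap_nil, List.append_nil]
    rw [← List.append_assoc, this, ← pvBlocks_split text F s hnd hne]


-- the tail of both loops, as one expression
def pvFinish (st : List String × List (Int × List String)) : List String :=
  (st.2.reverse).foldl (fun r f => r ++ f.2) st.1

-- invariant preservation: a character that is not a bracket
lemma pvWf_skip (bl : List Char) (done : List Char) (c : Char)
    (F : List (Int × Int)) (stA : List Int)
    (hc : bl.contains c = false) (wf : PvWf bl done F stA) :
    PvWf bl (done ++ [c]) F stA := by
  obtain ⟨h1, h2, h3, h4, h5, h6⟩ := wf
  have ho : pvIsOpen bl c = false := by unfold pvIsOpen; rw [hc]; rfl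
  have hcl : pvIsClose bl c = false := by unfold pvIsClose; rw [hc]; rfl
  refine ⟨h1, fun s hs => ?_, fun p hp => ?_, h4, h5, ?_⟩
  · have := h2 s hs
    simp only [List.length_append, List.length_cons, List.length_nil]
    push_cast; omega
  · have := h3 p hp
    simp only [List.length_append, List.length_cons, List.length_nil]
    push_cast; omega
  · simp [List.countP_append, ho, hcl]; omega

-- invariant preservation: an opening bracket at position done.length
lemma pvWf_open (bl : List Char) (done : List Char) (c : Char)
    (F : List (Int × Int)) (stA : List Int)
    (hc : bl.contains c = true) (hh : (bl.head? == some c) = true)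
    (wf : PvWf bl done F stA) :
    PvWf bl (done ++ [c]) F ((done.length : Int) :: stA) := by
  obtain ⟨h1, h2, h3, h4, h5, h6⟩ := wf
  have ho : pvIsOpen bl c = true := by unfold pvIsOpen; rw [hc, hh]; rfl
  have hcl : pvIsClose bl c = false := by unfold pvIsClose; rw [hc, hh]; rfl
  constructor
  · exact List.pairwise_cons.mpr ⟨fun s hs => h2 s hs, h1⟩
  · intro s hs
    simp only [List.length_append, List.length_cons, List.length_nil]
    push_cast
    rcases List.mem_cons.mp hs with rfl | h
    · omega
    · have := h2 s h; omega
  · intro p hp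
    have := h3 p hp
    simp only [List.length_append, List.length_cons, List.length_nil]
    push_cast; omega
  · intro p hp
    intro hmem
    rcases List.mem_cons.mp hmem with h | h
    · have := h3 p hp; omega
    · exact h4 p hp h
  · exact h5
  · simp [List.countP_append, ho, hcl]; omega

-- invariant preservation: a closing bracket pops the top open position
lemma pvWf_close (bl : List Char) (done : List Char) (c : Char)
    (F : List (Int × Int)) (s : Int) (stA : List Int)
    (hc : bl.contains c = true) (hh : (bl.head? == some c) = false)
    (wf : PvWf bl done F (s :: stA)) :
    PvWf bl (done ++ [c]) (F ++ [(s, (done.length : Int) + 1)]) stA := by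
  obtain ⟨h1, h2, h3, h4, h5, h6⟩ := wf
  have ho : pvIsOpen bl c = false := by unfold pvIsOpen; rw [hc, hh]; rfl
  have hcl : pvIsClose bl c = true := by unfold pvIsClose; rw [hc, hh]; rfl
  rcases List.pairwise_cons.mp h1 with ⟨hgt, h1'⟩
  constructor
  · exact h1'
  · intro t ht
    have := h2 t (List.mem_cons_of_mem _ ht)
    simp only [List.length_append, List.length_cons, List.length_nil]
    push_cast; omega
  · intro p hp
    simp only [List.length_append, List.length_cons, List.length_nil]
    push_cast
    rcases List.mem_append.mp hp with h | h
    · have := h3 p h; omega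
    · simp only [List.mem_singleton] at h
      have := h2 s List.mem_cons_self
      subst h
      simp only
      omega
  · intro p hp hmem
    rcases List.mem_append.mp hp with h | h
    · exact h4 p h (List.mem_cons_of_mem _ hmem)
    · simp only [List.mem_singleton] at h
      subst h
      have := hgt _ hmem
      simp at this
  · rw [List.map_append]
    simp only [List.map_cons, List.map_nil]
    rw [List.nodup_append]
    refine ⟨h5, List.nodup_singleton _, fun a ha b hb => ?_⟩
    have hb' : b = s := by simpa using hb
    subst hb'
    intro he
    obtain ⟨p, hp, hp1⟩ := List.mem_map.mp ha
    exact h4 p hp (by rw [hp1, he]; exact List.mem_cons_self)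
  · have := h6
    simp only [List.length_cons] at this
    simp [List.countP_append, ho, hcl]; omega

-- unfolding equations of the two loops (definitional)
lemma pvGoA_cons (bl : List Char) (c : Char) (rest : List Char) (i : Int)
    (founds : List (Int × Int)) (stack : List Int) :
    pvGoA bl (c :: rest) i founds stack =
      if bl.contains c then
        if bl.head? == some c then
          pvGoA bl rest (i + 1) founds (i :: stack)
        else
          match stack with
          | s :: stack' => pvGoA bl rest (i + 1) (founds ++ [(s, i + 1)]) stack'
          | [] => founds
      else pvGoA bl rest (i + 1) founds stack := rfl

lemma pvGoB_cons (text : String) (bl : List Char) (c : Char) (rest : List Char) (i : Int)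
    (result : List String) (stack : List (Int × List String)) :
    pvGoB text bl (c :: rest) i result stack =
      if bl.contains c then
        if bl.head? == some c then
          pvGoB text bl rest (i + 1) result ((i, []) :: stack)
        else
          match stack with
          | (s, children) :: stack' =>
            match stack' with
            | (s', ch') :: stack'' =>
                pvGoB text bl rest (i + 1) result
                  ((s', ch' ++ (PySem.Str.slice text (some s) (some (i + 1)) :: children)) :: stack'')
            | [] =>
                pvGoB text bl rest (i + 1)
                  (result ++ (PySem.Str.slice text (some s) (some (i + 1)) :: children)) []
          | [] => (result, stack)
      else pvGoB text bl rest (i + 1) result stack := rfl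

-- one lockstep run of both loops from invariant-related states
lemma pvStep (text : String) (bl : List Char) :
    ∀ (rest done : List Char) (F : List (Int × Int)) (stA : List Int),
      text.toList = done ++ rest →
      (∀ n ≤ text.toList.length,
        (text.toList.take n).countP (pvIsClose bl) ≤ (text.toList.take n).countP (pvIsOpen bl)) →
      PvWf bl done F stA →
      pvFinish (pvGoB text bl rest (done.length : Int)
          (pvBlocks text (pvLowOf F stA)) (pvFramesOf text F stA))
      = pvBlocks text (pvGoA bl rest (done.length : Int) F stA) := by
  intro rest
  induction rest with
  | nil =>
    intro done F stA _ _ wf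
    show pvFinish (pvBlocks text (pvLowOf F stA), pvFramesOf text F stA) = _
    unfold pvFinish
    rw [pvFoldl_extend]
    exact pvBubble text F stA wf.hnomem wf.hnd
  | cons c rest ih =>
    intro done F stA hsplit hpre wf
    have hlen1 : ((done ++ [c]).length : Int) = (done.length : Int) + 1 := by
      simp only [List.length_append, List.length_cons, List.length_nil]; push_cast; omega
    have hsplit' : text.toList = (done ++ [c]) ++ rest := by simpa using hsplit
    by_cases hc : bl.contains c = true
    · by_cases hh : (bl.head? == some c) = true
      · -- opening bracket
        rw [pvGoA_cons, pvGoB_cons, if_pos hc, if_pos hc, if_pos hh, if_pos hh]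
        have hfr : pvFramesOf text F ((done.length : Int) :: stA)
            = ((done.length : Int), []) :: pvFramesOf text F stA := by
          show (_, pvBlocks text (F.filter _)) :: pvFramesOf text (F.filter _) stA = _
          rw [pvFilter_gt_all F _ wf.hflt, pvFilter_lt_all F _ wf.hflt]
          rfl
        have hlo : pvLowOf F ((done.length : Int) :: stA) = pvLowOf F stA := by
          show pvLowOf (F.filter _) stA = _
          rw [pvFilter_lt_all F _ wf.hflt]
        rw [← hfr, ← hlo]
        have := ih (done ++ [c]) F ((done.length : Int) :: stA) hsplit' hpre
          (pvWf_open bl done c F stA hc hh wf)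
        rw [hlen1] at this
        exact this
      · -- closing bracket: the stack is nonempty under Pre_
        have hhf : (bl.head? == some c) = false := by simpa using hh
        have hclb : pvIsClose bl c = true := by unfold pvIsClose; rw [hc, hhf]; rfl
        have hob : pvIsOpen bl c = false := by unfold pvIsOpen; rw [hc, hhf]; rfl
        have htake : text.toList.take (done.length + 1) = done ++ [c] := by
          rw [hsplit, List.take_append]
          simp
        have hle : done.length + 1 ≤ text.toList.length := by
          rw [hsplit]; simp
        have hcount := hpre (done.length + 1) hle
        rw [htake] at hcount
        simp [List.countP_append, hclb, hob] at hcount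
        have h6 := wf.hcnt
        obtain ⟨s, stA', rfl⟩ : ∃ s stA', stA = s :: stA' := by
          cases stA with
          | nil => simp at h6; omega
          | cons a t => exact ⟨a, t, rfl⟩
        have hne : ∀ p ∈ F, p.1 ≠ s := fun p hp h =>
          wf.hnomem p hp (h ▸ List.mem_cons_self)
        have hwf' := pvWf_close bl done c F s stA' hc hhf wf
        rw [pvGoA_cons, pvGoB_cons, if_pos hc, if_pos hc, if_neg (by simp [hhf]),
          if_neg (by simp [hhf])]
        cases stA' with
        | nil =>
          -- popping the only frame: the block goes to the result
          show pvFinish (pvGoB text bl rest ((done.length : Int) + 1)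
              (pvBlocks text (pvLowOf F [s]) ++ _) []) = _
          have hres : pvBlocks text (pvLowOf F [s])
              ++ (PySem.Str.slice text (some s) (some ((done.length : Int) + 1))
                  :: pvBlocks text (F.filter (fun p => decide (s < p.1))))
              = pvBlocks text (pvLowOf (F ++ [(s, (done.length : Int) + 1)]) []) := by
            show _ = pvBlocks text (F ++ [(s, (done.length : Int) + 1)])
            rw [pvBlocks_insert text F s _ wf.hnd hne]
            rfl
          rw [hres]
          have := ih (done ++ [c]) (F ++ [(s, (done.length : Int) + 1)]) [] hsplit' hpre hwf'
          rw [hlen1] at this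
          exact this
        | cons s' stA'' =>
          -- the block bubbles into the enclosing frame
          have hss' : s' < s := by
            have := List.rel_of_pairwise_cons wf.hdec (List.mem_cons_self)
            simpa using this
          have hne' : ∀ p ∈ F.filter (fun p => decide (s' < p.1)), p.1 ≠ s :=
            fun p hp => hne p (List.mem_of_mem_filter hp)
          have hfr : ((s', pvBlocks text ((F.filter (fun p => decide (p.1 < s))).filter (fun p => decide (s' < p.1)))
                ++ (PySem.Str.slice text (some s) (some ((done.length : Int) + 1))
                    :: pvBlocks text (F.filter (fun p => decide (s < p.1)))))
               :: pvFramesOf text ((F.filter (fun p => decide (p.1 < s))).filter (fun p => decide (p.1 < s'))) stA'')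
              = pvFramesOf text (F ++ [(s, (done.length : Int) + 1)]) (s' :: stA'') := by
            show _ = (s', pvBlocks text ((F ++ _).filter _)) :: pvFramesOf text ((F ++ _).filter _) stA''
            have e1 : (F ++ [(s, (done.length : Int) + 1)]).filter (fun p => decide (s' < p.1))
                = F.filter (fun p => decide (s' < p.1)) ++ [(s, (done.length : Int) + 1)] := by
              rw [List.filter_append]
              simp [hss']
            have e2 : (F ++ [(s, (done.length : Int) + 1)]).filter (fun p => decide (p.1 < s'))
                = F.filter (fun p => decide (p.1 < s')) := by
              rw [List.filter_append]
              have : ¬ ((s : Int) < s') := by omega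
              simp [this]
            rw [e1, e2, pvBlocks_insert text _ s _ (pvNodup_filter F _ wf.hnd) hne',
              pvFilter_comm, pvFilter_absorb_gt F s' s hss', pvFilter_absorb_lt F s' s hss']
            rfl
          have hlo : pvLowOf F (s :: s' :: stA'')
              = pvLowOf (F ++ [(s, (done.length : Int) + 1)]) (s' :: stA'') := by
            show pvLowOf ((F.filter _).filter _) stA'' = pvLowOf ((F ++ _).filter _) stA''
            rw [pvFilter_absorb_lt F s' s hss']
            congr 1
            rw [List.filter_append]
            have : ¬ ((s : Int) < s') := by omega
            simp [this]
          show pvFinish (pvGoB text bl rest ((done.length : Int) + 1)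
              (pvBlocks text (pvLowOf F (s :: s' :: stA''))) _) = _
          rw [hlo, hfr]
          have := ih (done ++ [c]) (F ++ [(s, (done.length : Int) + 1)]) (s' :: stA'') hsplit' hpre hwf'
          rw [hlen1] at this
          exact this
    · -- not a bracket
      have hc' : bl.contains c = false := by simpa using hc
      rw [pvGoA_cons, pvGoB_cons, if_neg hc, if_neg hc]
      have := ih (done ++ [c]) F stA hsplit' hpre (pvWf_skip bl done c F stA hc' wf)
      rw [hlen1] at this
      exact this

-- ===== VERDICT (by name: the statement is the Claim_ definition above) =====
theorem parse_braket_block_spec : Claim_equal_parse_braket_block := by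
  intro text brakets _ hpre
  unfold Spec_parse_braket_block parse_braket_block parse_braket_block_alt
  have h := pvStep text brakets.toList text.toList [] [] []
    (by simp) hpre
    ⟨List.Pairwise.nil, by simp, by simp, by simp, List.nodup_nil, rfl⟩
  simp only [pvLowOf, pvFramesOf, List.length_nil, Int.natCast_zero] at h
  exact h.symm
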